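-- pv_equiv track=rewrite | github.com/jpordoy/Ictal-Phase-Detection | heart_rate_length_experiments.py | replace_trailing_zeros
-- ===== SOURCE A (Python) =====
-- def replace_trailing_zeros(array):
--     # Find the index of the last positive integer value
--     last_positive_index = len(array) - 1
--     while last_positive_index >= 0 and array[last_positive_index] == 0:
--         last_positive_index -= 1
--
--     # Replace trailing zeros with decreasing positive integer values
--     current_value = array[last_positive_index]
--     for i in range(last_positive_index + 1, len(array)):
--         array[i] = current_value
--         current_value -= 1
--         if current_value < 0:
--             current_value = 0  # Ensure non-negative values
--
--     return array
-- ===== SOURCE B (Python) =====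
-- def replace_trailing_zeros(array):
--     # Count the trailing zeros by walking the reversed view, then rebuild the tail
--     # as one segment: a countdown produced by range() padded with zeros, and
--     # slice-assign it in place. No per-slot accumulator and no clamp per element.
--     z = 0
--     for v in reversed(array):
--         if v != 0:
--             break
--         z += 1
--     base = array[len(array) - 1 - z]  # index -1 (last element, a zero) when all zeros; IndexError on []
--     countdown = [base] + list(range(base - 1, max(base - z, 0), -1))
--     array[len(array) - z:] = (countdown + [0] * z)[:z]
--     return array
-- ===== Notes on version B (the rewrite author's own statement) =====
-- stated objective: alternative
-- what changed: Instead of A's in-place loop that writes each slot from a clamp-and-decrement accumulator, B counts the trailing zeros over the reversed view, builds the whole tail at once as a range()-generated countdown segment padded with zeros, and slice-assigns it.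
-- outside the precondition, e.g. on replace_trailing_zeros([]): A raises IndexError, B raises IndexError
import Mathlib
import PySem

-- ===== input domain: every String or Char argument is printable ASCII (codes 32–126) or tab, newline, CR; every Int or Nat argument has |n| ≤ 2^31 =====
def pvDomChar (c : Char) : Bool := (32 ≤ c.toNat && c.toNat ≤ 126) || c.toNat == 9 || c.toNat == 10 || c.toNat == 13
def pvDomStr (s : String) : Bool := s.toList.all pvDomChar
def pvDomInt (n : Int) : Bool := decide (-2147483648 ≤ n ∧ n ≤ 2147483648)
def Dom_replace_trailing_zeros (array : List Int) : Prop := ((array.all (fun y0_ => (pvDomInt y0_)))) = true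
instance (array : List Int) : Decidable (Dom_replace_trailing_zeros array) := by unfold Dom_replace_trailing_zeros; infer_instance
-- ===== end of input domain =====

-- B replaces A's in-place loop with its clamp-and-decrement accumulator by counting the
-- trailing zeros over the reversed view and slice-assigning one prebuilt segment
-- (a range()-generated countdown padded with zeros): objective 'alternative'.
-- Both programs mutate the Python list in place the same way; the theorems are about the return value.

-- ===== PORT A =====

-- the `while last_positive_index >= 0 and array[last_positive_index] == 0` scan;
-- the Nat argument is last_positive_index + 1, so 0 encodes index -1
def pvFindA (array : List Int) : Nat → Int
  | 0 => -1
  | n + 1 => if PySem.List.pyGet? array (n : Int) = some 0 then pvFindA array n else (n : Int)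

-- the for loop: writes cv at each index, then decrements and clamps
def pvLoopA (array : List Int) (cv : Int) : List Int → List Int
  | [] => array
  | i :: rest =>
    let array' := array.set i.toNat cv   -- i comes from range(lpi+1, len), hence i ≥ 0: set is exact
    let cv' := cv - 1
    let cv'' := if cv' < 0 then 0 else cv'
    pvLoopA array' cv'' rest

def replace_trailing_zeros (array : List Int) : List Int :=
  let lpi := pvFindA array array.length
  -- array[lpi] with Python's negative-index rule; pyGet? is none only for array = [], excluded by Pre_
  let cv := (PySem.List.pyGet? array lpi).getD 0
  pvLoopA array cv (PySem.List.pyRange (lpi + 1) (array.length : Int) 1)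

-- ===== PORT B =====

-- the `for v in reversed(array): if v != 0: break; z += 1` count, applied to array.reverse
def pvCountZ : List Int → Nat
  | [] => 0
  | v :: rest => if v ≠ 0 then 0 else pvCountZ rest + 1

def replace_trailing_zeros_alt (array : List Int) : List Int :=
  let z := pvCountZ array.reverse
  -- array[len(array)-1-z] with Python's negative-index rule; pyGet? is none only for array = [], excluded by Pre_
  let base := (PySem.List.pyGet? array ((array.length : Int) - 1 - (z : Int))).getD 0
  let countdown := base :: PySem.List.pyRange (base - 1) (max (base - (z : Int)) 0) (-1)
  let tail := (countdown ++ List.replicate z 0).take z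
  -- slice assignment array[len(array)-z:] = tail; the start index is a Nat ≤ len, so take is exact
  array.take (array.length - z) ++ tail

-- ===== PRECONDITION & SPEC =====
-- Python A raises IndexError on the empty list (array[-1] on []); B raises there too.
def Pre_replace_trailing_zeros (array : List Int) : Prop := array ≠ []
instance (array : List Int) : Decidable (Pre_replace_trailing_zeros array) := by
  unfold Pre_replace_trailing_zeros; infer_instance

def pvWitness_replace_trailing_zeros : List Int := [3, 0, 0, 0]

def Spec_replace_trailing_zeros (array : List Int) (out : List Int) : Prop := out = replace_trailing_zeros_alt array
instance (array : List Int) (out : List Int) : Decidable (Spec_replace_trailing_zeros array out) := by unfold Spec_replace_trailing_zeros; infer_instance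

-- ===== CLAIM (what is proved, stated in full; the proofs are below) =====
def Claim_equal_replace_trailing_zeros : Prop := ∀ (array : List Int), Dom_replace_trailing_zeros array → Pre_replace_trailing_zeros array → Spec_replace_trailing_zeros array (replace_trailing_zeros array)

-- ===== LEMMAS AND PROOFS =====

-- the sequence of values A's loop writes, starting from cv
def pvSeq (cv : Int) : Nat → List Int
  | 0 => []
  | m + 1 => cv :: pvSeq (if cv - 1 < 0 then 0 else cv - 1) m

theorem pvTakeSet (l : List Int) (p : Nat) (x : Int) (h : p < l.length) :
    (l.set p x).take (p + 1) = l.take p ++ [x] := by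
  induction l generalizing p with
  | nil => simp at h
  | cons a t ih =>
    cases p with
    | zero => simp
    | succ q =>
      simp only [List.length_cons] at h
      simp [List.set, List.take_succ_cons, ih q (by omega)]

theorem pvLoopA_eq (m : Nat) : ∀ (arr : List Int) (cv : Int) (p : Nat),
    p ≤ arr.length → arr.length - p = m →
    pvLoopA arr cv (PySem.List.pyRange (p : Int) (arr.length : Int) 1) =
      arr.take p ++ pvSeq cv m := by
  induction m with
  | zero =>
    intro arr cv p hp hm
    have hpe : p = arr.length := by omega
    rw [PySem.List.pyRange_one_eq_nil (by omega)]
    simp [pvLoopA, pvSeq, hpe]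
  | succ m ih =>
    intro arr cv p hp hm
    have hlt : (p : Int) < (arr.length : Int) := by omega
    rw [PySem.List.pyRange_one_cons hlt]
    simp only [pvLoopA, pvSeq]
    have hset : ((p : Int)).toNat = p := by omega
    rw [hset]
    have hcast : (p : Int) + 1 = ((p + 1 : Nat) : Int) := by push_cast; ring
    have hlen : (arr.set p cv).length = arr.length := by simp
    rw [hcast]
    have := ih (arr.set p cv) (if cv - 1 < 0 then 0 else cv - 1) (p + 1)
      (by rw [hlen]; omega) (by rw [hlen]; omega)
    rw [hlen] at this
    rw [this]
    rw [show (arr.set p cv).take (p + 1) = arr.take p ++ [cv] from pvTakeSet arr p cv (by omega)]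
    simp

-- pyGet? ignores an appended element at nonnegative in-range indices
theorem pvPyGetAppend (xs : List Int) (a : Int) (j : Nat) (h : j < xs.length) :
    PySem.List.pyGet? (xs ++ [a]) (j : Int) = PySem.List.pyGet? xs (j : Int) := by
  simp [PySem.List.pyGet?_natCast, List.getElem?_append_left h]

theorem pvFindA_append (xs : List Int) (a : Int) (k : Nat) (hk : k ≤ xs.length) :
    pvFindA (xs ++ [a]) k = pvFindA xs k := by
  induction k with
  | zero => rfl
  | succ n ih =>
    simp only [pvFindA, pvPyGetAppend xs a n (by omega), ih (by omega)]

-- A's backward while-scan lands exactly at len - 1 - (B's trailing-zero count)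
theorem pvFindA_eq_count (array : List Int) :
    pvCountZ array.reverse ≤ array.length ∧
      pvFindA array array.length =
        (array.length : Int) - 1 - (pvCountZ array.reverse : Int) := by
  induction array using List.reverseRecOn with
  | nil => simp [pvFindA, pvCountZ]
  | append_singleton xs a ih =>
    rw [List.reverse_append]
    simp only [List.reverse_singleton, List.singleton_append, pvCountZ]
    have hlen : (xs ++ [a]).length = xs.length + 1 := by simp
    have hget : PySem.List.pyGet? (xs ++ [a]) (xs.length : Int) = some a := by
      rw [PySem.List.pyGet?_natCast]; simp
    by_cases ha : a = 0
    · subst ha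
      rw [if_neg (by simp), hlen]
      refine ⟨by omega, ?_⟩
      show pvFindA (xs ++ [(0 : Int)]) (xs.length + 1) = _
      rw [show pvFindA (xs ++ [(0 : Int)]) (xs.length + 1) =
            pvFindA (xs ++ [(0 : Int)]) xs.length by simp [pvFindA],
          pvFindA_append xs 0 xs.length le_rfl, ih.2]
      push_cast; ring
    · rw [if_pos ha, hlen]
      refine ⟨by omega, ?_⟩
      show pvFindA (xs ++ [a]) (xs.length + 1) = _
      simp only [pvFindA, hget]
      rw [if_neg (by simp [ha])]
      push_cast; ring

theorem pvSeq_length (cv : Int) (m : Nat) : (pvSeq cv m).length = m := by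
  induction m generalizing cv with
  | zero => rfl
  | succ m ih => simp [pvSeq, ih]

theorem pvSeq_getElem (m : Nat) : ∀ (cv : Int) (i : Nat) (h : i < m),
    (pvSeq cv m)[i]'(by rw [pvSeq_length]; exact h) = if i = 0 then cv else max (cv - i) 0 := by
  induction m with
  | zero => intro cv i h; omega
  | succ m ih =>
    intro cv i h
    cases i with
    | zero => simp [pvSeq]
    | succ j =>
      simp only [pvSeq, List.getElem_cons_succ]
      by_cases hm : j < m
      · rw [ih _ j hm, if_neg (Nat.succ_ne_zero j)]
        by_cases hj : j = 0
        · subst hj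
          rw [if_pos rfl, Int.max_def]
          split_ifs <;> push_cast <;> omega
        · rw [if_neg hj, Int.max_def, Int.max_def]
          split_ifs <;> push_cast <;> omega
      · omega

-- B's padded countdown segment is exactly the value sequence A's loop writes
theorem pvTail_eq (cv : Int) (z : Nat) :
    ((cv :: PySem.List.pyRange (cv - 1) (max (cv - (z : Int)) 0) (-1)) ++
        List.replicate z 0).take z = pvSeq cv z := by
  rw [PySem.List.pyRange_neg_one]
  have hM : ((cv - 1) - max (cv - (z : Int)) 0).toNat ≤ z := by
    rw [Int.max_def]; split_ifs <;> omega
  set M : Nat := ((cv - 1) - max (cv - (z : Int)) 0).toNat with hMdef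
  have hlen : ((cv :: (List.range M).map (fun k => cv - 1 - (k : Int))) ++
      List.replicate z 0).length = M + 1 + z := by simp; omega
  apply List.ext_getElem
  · simp [pvSeq_length]; omega
  · intro i hi hi2
    have hiz : i < z := by rw [pvSeq_length] at hi2; exact hi2
    rw [List.getElem_take, pvSeq_getElem z cv i hiz]
    by_cases hmid : i < M + 1
    · rw [List.getElem_append_left (by simpa using hmid)]
      cases i with
      | zero => simp
      | succ j =>
        rw [List.getElem_cons_succ, List.getElem_map, List.getElem_range,
          if_neg (Nat.succ_ne_zero j)]
        have hjM : (j : Int) < (cv - 1) - max (cv - (z : Int)) 0 := by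
          have h1 : j < M := by omega
          omega
        rw [Int.max_def] at hjM ⊢
        split_ifs at hjM ⊢ <;> push_cast <;> omega
    · rw [List.getElem_append_right (by simpa using hmid), List.getElem_replicate,
        if_neg (by omega : ¬ i = 0)]
      have hge : ((M : Int)) ≤ (i : Int) := by exact_mod_cast Nat.le_of_not_lt (by omega)
      have hMge : (cv - 1) - max (cv - (z : Int)) 0 ≤ (M : Int) := by
        rw [hMdef]; omega
      rw [Int.max_def] at hMge ⊢
      split_ifs at hMge ⊢ <;> push_cast <;> omega

-- ===== VERDICT (by name: the statement is the Claim_ definition above) =====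
theorem replace_trailing_zeros_spec : Claim_equal_replace_trailing_zeros := by
  intro array _ _
  simp only [Spec_replace_trailing_zeros, replace_trailing_zeros, replace_trailing_zeros_alt]
  obtain ⟨hzle, hfind⟩ := pvFindA_eq_count array
  set z := pvCountZ array.reverse with hz
  rw [hfind]
  set cv := (PySem.List.pyGet? array ((array.length : Int) - 1 - (z : Int))).getD 0 with hcv
  set p := array.length - z with hp
  have hple : p ≤ array.length := by omega
  have hpc : (array.length : Int) - 1 - (z : Int) + 1 = (p : Int) := by
    rw [hp]; push_cast [Nat.cast_sub hzle]; ring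
  rw [hpc, pvLoopA_eq (array.length - p) array cv p hple rfl]
  have hm : array.length - p = z := by omega
  rw [hm, ← pvTail_eq cv z]
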